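-- pv_equiv track=rewrite | github.com/404fafnir/Python_cours | data_cleaning.py | del_croco
-- ===== SOURCE A (Python) =====
-- def del_croco (ligne):
--
--     newligne = ""
--
--     incroco = False
--
--     for i in range (0, len(ligne)):
--
--         if (ligne[i] != '<') and not(incroco):
--             newligne += ligne[i]
--             incroco = False
--
--         elif ligne[i] == '>':
--             incroco = False
--
--         else:
--             incroco = True
--
--     return newligne
-- ===== SOURCE B (Python) =====
-- def del_croco(ligne):
--     # Skip-ahead scan: jump from '<' directly past the next '>' via str.find,
--     # copying untouched stretches with slices (no per-character state flag).
--     out = []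
--     i = 0
--     while True:
--         j = ligne.find('<', i)
--         if j == -1:
--             out.append(ligne[i:])
--             break
--         out.append(ligne[i:j])
--         k = ligne.find('>', j + 1)
--         if k == -1:
--             break
--         i = k + 1
--     return ''.join(out)
-- ===== Notes on version B (the rewrite author's own statement) =====
-- stated objective: faster
-- what changed: Replaces A's per-character state machine with an incroco boolean flag by a skip-ahead scan that uses str.find to jump from each tag opener directly past its closer and copies the untouched stretches as whole slices.
import Mathlib
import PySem

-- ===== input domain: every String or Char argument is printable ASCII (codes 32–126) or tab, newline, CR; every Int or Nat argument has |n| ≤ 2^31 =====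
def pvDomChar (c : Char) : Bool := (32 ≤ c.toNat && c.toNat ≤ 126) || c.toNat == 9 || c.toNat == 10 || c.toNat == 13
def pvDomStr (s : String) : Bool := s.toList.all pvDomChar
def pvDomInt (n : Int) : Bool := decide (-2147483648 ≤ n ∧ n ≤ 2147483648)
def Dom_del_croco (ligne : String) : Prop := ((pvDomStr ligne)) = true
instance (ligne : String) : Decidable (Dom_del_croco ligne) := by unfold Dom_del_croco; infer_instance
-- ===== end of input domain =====

-- B replaces A's per-character boolean state machine with a skip-ahead scan
-- (find the next '<', copy the stretch before it, jump past the next '>'): alternative decomposition.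


-- ===== PORT A =====
-- A's loop body: state = (accumulated output, incroco flag); branches in A's order.
def pvStepA (st : List Char × Bool) (c : Char) : List Char × Bool :=
  if c ≠ '<' ∧ st.2 = false then (st.1 ++ [c], false)
  else if c = '>' then (st.1, false)
  else (st.1, true)

-- A iterates i over range(len(ligne)) reading ligne[i] in order: ported as a fold over the characters.
def del_croco (ligne : String) : String :=
  String.mk (ligne.toList.foldl pvStepA ([], false)).1

-- ===== PORT B =====
-- B's loop: `ligne.find('<', i)` + slice  =  takeWhile/dropWhile on the remaining suffix;
-- copy the stretch before the '<', then `find('>', j+1)` and continue past it; stop when either find fails.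
def pvLoopB (l : List Char) : List Char :=
  let pre := l.takeWhile (· ≠ '<')
  match h : l.dropWhile (· ≠ '<') with
  | [] => pre                                   -- j == -1: append ligne[i:], break
  | _ :: r =>                                   -- r = text after the '<'
    match h2 : r.dropWhile (· ≠ '>') with
    | [] => pre                                 -- k == -1: break (unterminated tag)
    | _ :: r3 => pre ++ pvLoopB r3              -- i = k + 1
termination_by l.length
decreasing_by
  have hd1 : (l.dropWhile (· ≠ '<')).length ≤ l.length := l.length_dropWhile_le _
  have hd2 : (r.dropWhile (· ≠ '>')).length ≤ r.length := r.length_dropWhile_le _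
  rw [h] at hd1; rw [h2] at hd2
  simp at hd1 hd2; omega

def del_croco_alt (ligne : String) : String :=
  String.mk (pvLoopB ligne.toList)

-- ===== PRECONDITION & SPEC =====
def Spec_del_croco (ligne : String) (out : String) : Prop := out = del_croco_alt ligne
instance (ligne : String) (out : String) : Decidable (Spec_del_croco ligne out) := by unfold Spec_del_croco; infer_instance

-- ===== CLAIM (what is proved, stated in full; the proofs are below) =====
def Claim_equal_del_croco : Prop := ∀ (ligne : String), Dom_del_croco ligne → Spec_del_croco ligne (del_croco ligne)

-- ===== LEMMAS AND PROOFS =====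

-- equation lemmas for pvLoopB's three exits
lemma loopB_nil (l : List Char) (hdrop : l.dropWhile (· ≠ '<') = []) :
    pvLoopB l = l.takeWhile (· ≠ '<') := by
  rw [pvLoopB]; split
  · rfl
  · rename_i heq; rw [hdrop] at heq; cases heq

lemma loopB_noclose (l : List Char) (c : Char) (r : List Char)
    (hdrop : l.dropWhile (· ≠ '<') = c :: r) (hd2 : r.dropWhile (· ≠ '>') = []) :
    pvLoopB l = l.takeWhile (· ≠ '<') := by
  rw [pvLoopB]; split
  · rfl
  · rename_i heq; rw [hdrop] at heq
    obtain ⟨rfl, rfl⟩ : c = _ ∧ r = _ := by injection heq with a b; exact ⟨a, b⟩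
    split
    · rfl
    · rename_i heq2; rw [hd2] at heq2; cases heq2

lemma loopB_step (l : List Char) (c c1 : Char) (r r3 : List Char)
    (hdrop : l.dropWhile (· ≠ '<') = c :: r) (hd2 : r.dropWhile (· ≠ '>') = c1 :: r3) :
    pvLoopB l = l.takeWhile (· ≠ '<') ++ pvLoopB r3 := by
  rw [pvLoopB]; split
  · rename_i heq; rw [hdrop] at heq; cases heq
  · rename_i heq; rw [hdrop] at heq
    obtain ⟨rfl, rfl⟩ : c = _ ∧ r = _ := by injection heq with a b; exact ⟨a, b⟩
    split
    · rename_i heq2; rw [hd2] at heq2; cases heq2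
    · rename_i heq2; rw [hd2] at heq2
      obtain ⟨rfl, rfl⟩ : c1 = _ ∧ r3 = _ := by injection heq2 with a b; exact ⟨a, b⟩
      rfl

-- Outside a tag, a run of non-'<' characters is copied verbatim and the flag stays false.
lemma foldA_copy (pre : List Char) (hpre : ∀ c ∈ pre, c ≠ '<') (acc : List Char) :
    List.foldl pvStepA (acc, false) pre = (acc ++ pre, false) := by
  induction pre generalizing acc with
  | nil => simp
  | cons c r ih =>
    have hc : c ≠ '<' := hpre c (by simp)
    have h1 : pvStepA (acc, false) c = (acc ++ [c], false) := by
      simp [pvStepA, hc]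
    rw [List.foldl_cons, h1, ih (fun x hx => hpre x (by simp [hx]))]
    simp

-- Inside a tag, a run of non-'>' characters is dropped and the flag stays true.
lemma foldA_skip (r1 : List Char) (hr1 : ∀ c ∈ r1, c ≠ '>') (acc : List Char) :
    List.foldl pvStepA (acc, true) r1 = (acc, true) := by
  induction r1 with
  | nil => simp
  | cons c r ih =>
    have hc : c ≠ '>' := hr1 c (by simp)
    have h1 : pvStepA (acc, true) c = (acc, true) := by
      simp [pvStepA, hc]
    rw [List.foldl_cons, h1, ih (fun x hx => hr1 x (by simp [hx]))]

-- the first character delivered by dropWhile violates the predicate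
lemma head_drop_lt (l : List Char) (c : Char) (r : List Char)
    (h : l.dropWhile (· ≠ '<') = c :: r) : c = '<' := by
  have h2 := List.head?_dropWhile_not (p := fun x => decide (x ≠ '<')) (l := l)
  rw [h] at h2; simpa using h2

lemma head_drop_gt (l : List Char) (c : Char) (r : List Char)
    (h : l.dropWhile (· ≠ '>') = c :: r) : c = '>' := by
  have h2 := List.head?_dropWhile_not (p := fun x => decide (x ≠ '>')) (l := l)
  rw [h] at h2; simpa using h2

-- A's fold and B's skip-ahead loop agree, for any accumulator.
lemma foldA_eq_loopB (n : Nat) : ∀ l : List Char, l.length ≤ n → ∀ acc : List Char,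
    (List.foldl pvStepA (acc, false) l).1 = acc ++ pvLoopB l := by
  induction n with
  | zero =>
    intro l hl acc
    have h0 : l = [] := List.eq_nil_of_length_eq_zero (Nat.le_zero.mp hl)
    subst h0
    rw [loopB_nil [] (by simp)]; simp
  | succ n ih =>
    intro l hl acc
    have hsplit := List.takeWhile_append_dropWhile (p := (· ≠ '<')) (l := l)
    have hpre : ∀ c ∈ l.takeWhile (· ≠ '<'), c ≠ '<' := by
      intro c hc; simpa using List.mem_takeWhile_imp hc
    cases hdrop : l.dropWhile (· ≠ '<') with
    | nil =>
      have hl_eq : l = l.takeWhile (· ≠ '<') := by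
        conv_lhs => rw [← hsplit]
        rw [hdrop, List.append_nil]
      rw [loopB_nil l hdrop]
      conv_lhs => rw [hl_eq]
      rw [foldA_copy _ hpre acc]
    | cons c0 r =>
      obtain rfl : c0 = '<' := head_drop_lt l c0 r hdrop
      have hl_eq : l = l.takeWhile (· ≠ '<') ++ '<' :: r := by
        conv_lhs => rw [← hsplit]; rw [hdrop]
      have hsplit2 := List.takeWhile_append_dropWhile (p := (· ≠ '>')) (l := r)
      have hr1 : ∀ c ∈ r.takeWhile (· ≠ '>'), c ≠ '>' := by
        intro c hc; simpa using List.mem_takeWhile_imp hc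
      have hstep : pvStepA (acc ++ l.takeWhile (· ≠ '<'), false) '<' = (acc ++ l.takeWhile (· ≠ '<'), true) := by
        simp [pvStepA]
      cases hdrop2 : r.dropWhile (· ≠ '>') with
      | nil =>
        have hr_eq : r = r.takeWhile (· ≠ '>') := by
          conv_lhs => rw [← hsplit2]
          rw [hdrop2, List.append_nil]
        rw [loopB_noclose l '<' r hdrop hdrop2]
        conv_lhs => rw [hl_eq]
        rw [List.foldl_append, foldA_copy _ hpre acc, List.foldl_cons, hstep]
        conv_lhs => rw [hr_eq]
        rw [foldA_skip _ hr1]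
      | cons c1 r3 =>
        obtain rfl : c1 = '>' := head_drop_gt r c1 r3 hdrop2
        have hr_eq : r = r.takeWhile (· ≠ '>') ++ '>' :: r3 := by
          conv_lhs => rw [← hsplit2]; rw [hdrop2]
        have hstep2 : pvStepA (acc ++ l.takeWhile (· ≠ '<'), true) '>' = (acc ++ l.takeWhile (· ≠ '<'), false) := by
          simp [pvStepA]
        have hlen : r3.length ≤ n := by
          have h1 : l.length = (l.takeWhile (· ≠ '<')).length + 1 + r.length := by
            conv_lhs => rw [hl_eq]
            simp; omega
          have h2 : r.length = (r.takeWhile (· ≠ '>')).length + 1 + r3.length := by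
            conv_lhs => rw [hr_eq]
            simp; omega
          omega
        rw [loopB_step l '<' '>' r r3 hdrop hdrop2]
        conv_lhs => rw [hl_eq]
        rw [List.foldl_append, foldA_copy _ hpre acc, List.foldl_cons, hstep]
        conv_lhs => rw [hr_eq]
        rw [List.foldl_append, foldA_skip _ hr1, List.foldl_cons, hstep2,
          ih r3 hlen, List.append_assoc]

-- ===== VERDICT (by name: the statement is the Claim_ definition above) =====
theorem del_croco_spec : Claim_equal_del_croco := by
  intro ligne _
  unfold Spec_del_croco del_croco del_croco_alt
  rw [foldA_eq_loopB ligne.toList.length ligne.toList le_rfl []]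
  simp
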